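-- pv_equiv track=rewrite | github.com/SEnteranewusername/randomcode | rsa.py | gcd2
-- ===== SOURCE A (Python) =====
-- def gcd2(num,num1):
--     d,p=num,num1
--     ce=[]
--     while p>0:
--         x=d%p
--         ce+=[d//p,x]
--         d=p
--         p=x
--         if d==p:
--             p=0
--     return(ce)
-- ===== SOURCE B (Python) =====
-- def gcd2(num, num1):
--     if num1 <= 0:
--         return []
--     return [num // num1, num % num1] + gcd2(num1, num % num1)
-- ===== Notes on version B (the rewrite author's own statement) =====
-- stated objective: simpler
-- what changed: Replaces the while-loop with mutable state and a dead d==p guard by a direct recursion on the Euclidean recurrence, emitting [q, r] and recursing on (num1, num % num1).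
import Mathlib
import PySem

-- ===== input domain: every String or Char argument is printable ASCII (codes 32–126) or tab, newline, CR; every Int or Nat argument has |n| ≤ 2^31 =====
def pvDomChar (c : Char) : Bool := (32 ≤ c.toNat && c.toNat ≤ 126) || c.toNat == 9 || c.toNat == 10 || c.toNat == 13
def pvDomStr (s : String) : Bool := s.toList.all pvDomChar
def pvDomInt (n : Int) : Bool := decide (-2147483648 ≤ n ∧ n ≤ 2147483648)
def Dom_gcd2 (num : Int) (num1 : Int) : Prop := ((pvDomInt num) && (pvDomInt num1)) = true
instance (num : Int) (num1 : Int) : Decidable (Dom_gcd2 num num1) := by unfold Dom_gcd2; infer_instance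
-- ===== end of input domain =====

-- B replaces A's while-loop (mutable d,p,ce and a dead d==p guard) by a direct
-- recursion on the Euclidean recurrence; same return value, no side effects.

-- ===== PORT A =====
-- the while loop of A: state (d, p, ce); terminates since 0 <= d % p < p when p > 0
def gcd2Loop (d : Int) (p : Int) (ce : List Int) : List Int :=
  if h : p > 0 then
    let x := PySem.Int.mod d p
    let ce' := ce ++ [PySem.Int.floordiv d p, x]
    -- d = p; p = x; if d == p then p = 0
    if p == x then gcd2Loop p 0 ce' else gcd2Loop p x ce'
  else ce
termination_by p.toNat
decreasing_by
  · simp only [Int.toNat_zero]; omega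
  · have h1 := PySem.Int.mod_nonneg d h
    have h2 := PySem.Int.mod_lt d h
    omega

def gcd2 (num : Int) (num1 : Int) : List Int := gcd2Loop num num1 []

-- ===== PORT B =====
def gcd2_alt (num : Int) (num1 : Int) : List Int :=
  if h : num1 <= 0 then []
  else [PySem.Int.floordiv num num1, PySem.Int.mod num num1]
        ++ gcd2_alt num1 (PySem.Int.mod num num1)
termination_by num1.toNat
decreasing_by
  have h1 := PySem.Int.mod_nonneg num (by omega : (0:Int) < num1)
  have h2 := PySem.Int.mod_lt num (by omega : (0:Int) < num1)
  omega

-- ===== PRECONDITION & SPEC =====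
def Spec_gcd2 (num : Int) (num1 : Int) (out : List Int) : Prop := out = gcd2_alt num num1
instance (num : Int) (num1 : Int) (out : List Int) : Decidable (Spec_gcd2 num num1 out) := by unfold Spec_gcd2; infer_instance

-- ===== CLAIM (what is proved, stated in full; the proofs are below) =====
def Claim_equal_gcd2 : Prop := ∀ (num : Int) (num1 : Int), Dom_gcd2 num num1 → Spec_gcd2 num num1 (gcd2 num num1)

-- ===== LEMMAS AND PROOFS =====
theorem gcd2Loop_eq_alt_bounded (n : Nat) :
    ∀ (d p : Int) (ce : List Int), p.toNat ≤ n →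
      gcd2Loop d p ce = ce ++ gcd2_alt d p := by
  induction n with
  | zero =>
    intro d p ce hb
    have hp : ¬ p > 0 := by omega
    rw [gcd2Loop, gcd2_alt]
    simp only [hp, dite_false, dif_pos (by omega : p ≤ 0), List.append_nil]
  | succ n ih =>
    intro d p ce hb
    rw [gcd2Loop, gcd2_alt]
    by_cases h : p > 0
    · have h1 := PySem.Int.mod_nonneg d h
      have h2 := PySem.Int.mod_lt d h
      have hne : ¬ (p == PySem.Int.mod d p) = true := by simp; omega
      simp only [h, dite_true, hne, if_false, dif_neg (by omega : ¬ p ≤ 0)]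
      rw [ih p (PySem.Int.mod d p) _ (by omega)]
      simp
    · simp only [h, dite_false, dif_pos (by omega : p ≤ 0), List.append_nil]

theorem gcd2Loop_eq_alt (d p : Int) (ce : List Int) :
    gcd2Loop d p ce = ce ++ gcd2_alt d p :=
  gcd2Loop_eq_alt_bounded p.toNat d p ce (le_refl _)

-- ===== VERDICT (by name: the statement is the Claim_ definition above) =====
theorem gcd2_spec : Claim_equal_gcd2 := by
  intro num num1 _
  unfold Spec_gcd2 gcd2
  rw [gcd2Loop_eq_alt]
  simp
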